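-- pv_equiv track=rewrite | github.com/nadjano/polyploid-allele-exp | scripts/scores_to_genecounts.py | merge_dicts_to_lists
-- ===== SOURCE A (Python) =====
-- def merge_dicts_to_lists(dict1, dict2):
--     """
--     Merge two dictionaries with overlapping keys.
--     For each key in either dictionary, create a list containing values from both dictionaries.
--     If a key exists in only one dictionary, use 0 for the missing value.
--     """
--     result = {}
--
--     # Get all unique keys from both dictionaries
--     all_keys = set(dict1.keys()) | set(dict2.keys())
--
--     # For each key, create a list with values from both dictionaries
--     for key in all_keys:
--         value1 = dict1.get(key, 0)  # Use 0 if key not in dict1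
--         value2 = dict2.get(key, 0)  # Use 0 if key not in dict2
--         result[key] = [value1, value2]
--
--     return result
-- ===== SOURCE B (Python) =====
-- def merge_dicts_to_lists(dict1, dict2):
--     pairs = [(k, [v, dict2.get(k, 0)]) for k, v in dict1.items()]
--     pairs += [(k, [0, v]) for k, v in dict2.items() if k not in dict1]
--     return dict(pairs)
-- ===== Notes on version B (the rewrite author's own statement) =====
-- stated objective: simpler
-- what changed: B drops A's set-union-of-keys pass entirely: it builds the result from two comprehensions, dict1's items paired with dict2.get(k, 0) and then dict2-only items as [0, v], with a membership test instead of a precomputed key union.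
import Mathlib
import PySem

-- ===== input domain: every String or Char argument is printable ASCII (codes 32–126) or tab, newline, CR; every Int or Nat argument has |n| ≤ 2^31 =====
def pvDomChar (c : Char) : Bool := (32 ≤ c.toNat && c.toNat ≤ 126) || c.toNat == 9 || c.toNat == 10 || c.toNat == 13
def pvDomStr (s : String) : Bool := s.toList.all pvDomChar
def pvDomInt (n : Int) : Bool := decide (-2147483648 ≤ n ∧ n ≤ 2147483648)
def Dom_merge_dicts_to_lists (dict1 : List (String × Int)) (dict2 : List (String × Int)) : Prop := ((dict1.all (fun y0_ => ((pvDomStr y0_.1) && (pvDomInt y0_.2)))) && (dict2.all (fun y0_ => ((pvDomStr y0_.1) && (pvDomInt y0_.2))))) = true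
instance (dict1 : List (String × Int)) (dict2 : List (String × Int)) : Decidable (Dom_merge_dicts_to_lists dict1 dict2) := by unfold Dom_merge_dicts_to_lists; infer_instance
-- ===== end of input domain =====

-- B replaces A's pass over the set-union of keys by two comprehensions (dict1's items
-- paired with dict2.get(k, 0), then dict2-only items as [0, v]); objective: simpler.

-- ===== PORT A =====
def merge_dicts_to_lists (dict1 : List (String × Int)) (dict2 : List (String × Int)) : List (String × List Int) :=
  -- all_keys = set(dict1.keys()) | set(dict2.keys())
  let allKeys : PySem.Set String :=
    PySem.Set.union (PySem.Set.ofList (dict1.map Prod.fst)) (PySem.Set.ofList (dict2.map Prod.fst))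
  -- for key in all_keys: value1 = dict1.get(key, 0); value2 = dict2.get(key, 0); result[key] = [value1, value2]
  (allKeys.foldl (fun result key =>
      let value1 : Int := (PySem.Dict.mk dict1).getD key 0
      let value2 : Int := (PySem.Dict.mk dict2).getD key 0
      result.insert key [value1, value2])
    PySem.Dict.empty).items

-- ===== PORT B =====
def merge_dicts_to_lists_alt (dict1 : List (String × Int)) (dict2 : List (String × Int)) : List (String × List Int) :=
  -- pairs = [(k, [v, dict2.get(k, 0)]) for k, v in dict1.items()]
  let pairs := dict1.map (fun p => (p.1, [p.2, (PySem.Dict.mk dict2).getD p.1 0]))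
  -- pairs += [(k, [0, v]) for k, v in dict2.items() if k not in dict1]
  let pairs := pairs ++
    (dict2.filter (fun p => !((PySem.Dict.mk dict1).contains p.1))).map
      (fun p => (p.1, ([0, p.2] : List Int)))
  -- return dict(pairs)
  (PySem.Dict.ofList pairs).items

-- ===== PRECONDITION & SPEC =====
-- Pre_ excludes association lists with duplicate keys: a Python dict cannot contain a
-- duplicate key, so such lists have no Python counterpart and their reading as a dict
-- (first vs last occurrence) is ambiguous.
def Pre_merge_dicts_to_lists (dict1 : List (String × Int)) (dict2 : List (String × Int)) : Prop :=
  (dict1.map Prod.fst).Nodup ∧ (dict2.map Prod.fst).Nodup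
instance (dict1 : List (String × Int)) (dict2 : List (String × Int)) : Decidable (Pre_merge_dicts_to_lists dict1 dict2) := by unfold Pre_merge_dicts_to_lists; infer_instance

def pvWitness_merge_dicts_to_lists : (List (String × Int)) × (List (String × Int)) :=
  ([("a", 1), ("c", -2)], [("a", 5), ("b", 3)])

def Spec_merge_dicts_to_lists (dict1 : List (String × Int)) (dict2 : List (String × Int)) (out : List (String × List Int)) : Prop := out = merge_dicts_to_lists_alt dict1 dict2
instance (dict1 : List (String × Int)) (dict2 : List (String × Int)) (out : List (String × List Int)) : Decidable (Spec_merge_dicts_to_lists dict1 dict2 out) := by unfold Spec_merge_dicts_to_lists; infer_instance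

-- ===== CLAIM (what is proved, stated in full; the proofs are below) =====
def Claim_equal_merge_dicts_to_lists : Prop := ∀ (dict1 : List (String × Int)) (dict2 : List (String × Int)), Dom_merge_dicts_to_lists dict1 dict2 → Pre_merge_dicts_to_lists dict1 dict2 → Spec_merge_dicts_to_lists dict1 dict2 (merge_dicts_to_lists dict1 dict2)

-- ===== LEMMAS AND PROOFS =====

-- set.update over a duplicate-free iterable appends exactly the elements not already present
theorem pv_update_nodup_eq (t s : List String) (ht : t.Nodup) :
    PySem.Set.update s t = s ++ t.filter (fun x => decide (x ∉ s)) := by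
  induction t generalizing s with
  | nil => simp [PySem.Set.update]
  | cons x t ih =>
    have hxt : x ∉ t := (List.nodup_cons.mp ht).1
    by_cases hx : x ∈ s
    · rw [show PySem.Set.update s (x :: t) = PySem.Set.update (PySem.Set.add s x) t from rfl,
          PySem.Set.add_of_mem hx, ih s (List.nodup_cons.mp ht).2]
      simp [hx]
    · rw [show PySem.Set.update s (x :: t) = PySem.Set.update (PySem.Set.add s x) t from rfl,
          PySem.Set.add_of_not_mem hx, ih (s ++ [x]) (List.nodup_cons.mp ht).2]
      have hf : t.filter (fun y => decide (y ∉ s ++ [x])) = t.filter (fun y => decide (y ∉ s)) := by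
        apply List.filter_congr
        intro y hy
        have hne : y ≠ x := fun h => hxt (h ▸ hy)
        simp [hne]
      rw [hf]
      simp [hx, List.append_assoc]

theorem merge_main (dict1 dict2 : List (String × Int))
    (h1 : (dict1.map Prod.fst).Nodup) (h2 : (dict2.map Prod.fst).Nodup) :
    merge_dicts_to_lists dict1 dict2 = merge_dicts_to_lists_alt dict1 dict2 := by
  have hkeys1 : ∀ x, ((PySem.Dict.mk dict1).contains x) = decide (x ∈ dict1.map Prod.fst) := by
    intro x
    rw [PySem.Dict.contains_eq_decide_mem_keys]
    simp [PySem.Dict.keys]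
  have hnodup1 : (PySem.Dict.mk dict1).keys.Nodup := by simpa [PySem.Dict.keys] using h1
  have hnodup2 : (PySem.Dict.mk dict2).keys.Nodup := by simpa [PySem.Dict.keys] using h2
  have hget1 : ∀ p ∈ dict1, (PySem.Dict.mk dict1).getD p.1 0 = p.2 := fun p hp =>
    PySem.Dict.getD_of_mem_items (PySem.Dict.mk dict1) hp hnodup1 0
  have hget2 : ∀ p ∈ dict2, (PySem.Dict.mk dict2).getD p.1 0 = p.2 := fun p hp =>
    PySem.Dict.getD_of_mem_items (PySem.Dict.mk dict2) hp hnodup2 0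
  have hget1none : ∀ x, x ∉ dict1.map Prod.fst → (PySem.Dict.mk dict1).getD x 0 = 0 := by
    intro x hx
    exact PySem.Dict.getD_of_not_contains (PySem.Dict.mk dict1) 0 (by rw [hkeys1]; simpa using hx)
  -- the key list A iterates over
  have hkeyset : PySem.Set.union (PySem.Set.ofList (dict1.map Prod.fst)) (PySem.Set.ofList (dict2.map Prod.fst))
      = dict1.map Prod.fst ++ (dict2.map Prod.fst).filter (fun x => decide (x ∉ dict1.map Prod.fst)) := by
    rw [show PySem.Set.union (PySem.Set.ofList (dict1.map Prod.fst)) (PySem.Set.ofList (dict2.map Prod.fst))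
          = PySem.Set.update (PySem.Set.ofList (dict1.map Prod.fst)) (PySem.Set.ofList (dict2.map Prod.fst)) from rfl,
        PySem.Set.ofList_eq_self_of_nodup _ h1, PySem.Set.ofList_eq_self_of_nodup _ h2]
    exact pv_update_nodup_eq _ _ h2
  have hnodupKeys : (dict1.map Prod.fst ++ (dict2.map Prod.fst).filter (fun x => decide (x ∉ dict1.map Prod.fst))).Nodup := by
    refine List.Nodup.append h1 (h2.filter _) ?_
    intro x hx1 hx2
    have hdec := (List.mem_filter.mp hx2).2
    simp only [decide_eq_true_eq] at hdec
    exact hdec hx1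
  -- A's items: the fold inserts fresh distinct keys into an empty dict, so it appends
  have hA : merge_dicts_to_lists dict1 dict2
      = (dict1.map Prod.fst ++ (dict2.map Prod.fst).filter (fun x => decide (x ∉ dict1.map Prod.fst))).map
          (fun key => (key, [(PySem.Dict.mk dict1).getD key 0, (PySem.Dict.mk dict2).getD key 0])) := by
    unfold merge_dicts_to_lists
    rw [hkeyset]
    have := PySem.Dict.items_foldl_insert_fresh
      (dict1.map Prod.fst ++ (dict2.map Prod.fst).filter (fun x => decide (x ∉ dict1.map Prod.fst)))
      (fun key => key)
      (fun key => [(PySem.Dict.mk dict1).getD key 0, (PySem.Dict.mk dict2).getD key 0])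
      PySem.Dict.empty
      (fun a _ => PySem.Dict.contains_empty a)
      (by simpa using hnodupKeys)
    exact this.trans (by simp [PySem.Dict.empty])
  have hfiltereq : (dict2.filter (fun p => !((PySem.Dict.mk dict1).contains p.1)))
      = dict2.filter (fun p => decide (p.1 ∉ dict1.map Prod.fst)) := by
    apply List.filter_congr
    intro p _
    rw [hkeys1]
    simp
  have hkeymap : ((dict2.map Prod.fst).filter (fun x => decide (x ∉ dict1.map Prod.fst)))
      = (dict2.filter (fun p => decide (p.1 ∉ dict1.map Prod.fst))).map Prod.fst :=
    List.filter_map (f := Prod.fst) (p := fun x => decide (x ∉ dict1.map Prod.fst)) (l := dict2)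
  have hpairskeys : (dict1.map (fun p => (p.1, [p.2, (PySem.Dict.mk dict2).getD p.1 0])) ++
        (dict2.filter (fun p => !((PySem.Dict.mk dict1).contains p.1))).map
          (fun p => (p.1, ([0, p.2] : List Int)))).map Prod.fst
      = dict1.map Prod.fst ++ (dict2.map Prod.fst).filter (fun x => decide (x ∉ dict1.map Prod.fst)) := by
    rw [List.map_append, List.map_map, List.map_map, hfiltereq, hkeymap]
    simp [Function.comp_def]
  -- B's items: dict(pairs) over distinct keys returns exactly pairs
  have hB : merge_dicts_to_lists_alt dict1 dict2
      = dict1.map (fun p => (p.1, [p.2, (PySem.Dict.mk dict2).getD p.1 0])) ++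
        (dict2.filter (fun p => !((PySem.Dict.mk dict1).contains p.1))).map
          (fun p => (p.1, ([0, p.2] : List Int))) := by
    unfold merge_dicts_to_lists_alt
    have := PySem.Dict.items_foldl_insert_fresh
      (dict1.map (fun p => (p.1, [p.2, (PySem.Dict.mk dict2).getD p.1 0])) ++
        (dict2.filter (fun p => !((PySem.Dict.mk dict1).contains p.1))).map
          (fun p => (p.1, ([0, p.2] : List Int))))
      Prod.fst Prod.snd PySem.Dict.empty
      (fun a _ => PySem.Dict.contains_empty a.1)
      (by rw [hpairskeys]; exact hnodupKeys)
    exact this.trans (by simp [PySem.Dict.empty, Function.comp_def])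
  rw [hA, hB, List.map_append]
  congr 1
  · rw [List.map_map]
    apply List.map_congr_left
    intro p hp
    simp only [Function.comp]
    rw [hget1 p hp]
  · rw [hfiltereq, hkeymap, List.map_map]
    apply List.map_congr_left
    intro p hp
    have hmem : p ∈ dict2 := List.mem_of_mem_filter hp
    have hnot : p.1 ∉ dict1.map Prod.fst := by
      have := (List.mem_filter.mp hp).2
      simpa using this
    simp only [Function.comp]
    rw [hget1none p.1 hnot, hget2 p hmem]

-- ===== VERDICT (by name: the statement is the Claim_ definition above) =====
theorem merge_dicts_to_lists_spec : Claim_equal_merge_dicts_to_lists := by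
  intro dict1 dict2 _ hpre
  unfold Spec_merge_dicts_to_lists
  exact merge_main dict1 dict2 hpre.1 hpre.2
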